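-- pv_equiv track=rewrite | github.com/GoogleCloudPlatform/professional-services | examples/bigquery-long-running-optimizer/utils_optimization/utils_optimization.py | update_count
-- ===== SOURCE A (Python) =====
-- def update_count(cte_key, list_of_tokens, dict1):
--     case_1 = cte_key+")"
--     case_2 = cte_key
--     indices  = [index for (index, ele) in enumerate(list_of_tokens) if ele == case_1]
--     indices_1  = [index for (index, ele) in enumerate(list_of_tokens) if ele == case_2]
--     indices_1 = indices_1 + indices
--
--     for idx_1 in indices_1:
--         if idx_1>0 and idx_1 < len(list_of_tokens):
--             if list_of_tokens[idx_1 - 1] in ['FROM', 'JOIN', 'from', 'join']: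
--                 dict1[cte_key] = dict1[cte_key]+ 1
--     return dict1
-- ===== SOURCE B (Python) =====
-- def update_count(cte_key, list_of_tokens, dict1):
--     targets = (cte_key, cte_key + ")")
--     n = sum(1 for prev, tok in zip(list_of_tokens, list_of_tokens[1:])
--             if tok in targets and prev in ('FROM', 'JOIN', 'from', 'join'))
--     if n:
--         dict1[cte_key] = dict1[cte_key] + n
--     return dict1
-- ===== Notes on version B (the rewrite author's own statement) =====
-- stated objective: simpler
-- what changed: Replaces the two index-list comprehensions and the index loop (with its per-hit dict update) by a single pairwise zip pass that counts matches, followed by one dict update when the count is positive.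
import Mathlib
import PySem

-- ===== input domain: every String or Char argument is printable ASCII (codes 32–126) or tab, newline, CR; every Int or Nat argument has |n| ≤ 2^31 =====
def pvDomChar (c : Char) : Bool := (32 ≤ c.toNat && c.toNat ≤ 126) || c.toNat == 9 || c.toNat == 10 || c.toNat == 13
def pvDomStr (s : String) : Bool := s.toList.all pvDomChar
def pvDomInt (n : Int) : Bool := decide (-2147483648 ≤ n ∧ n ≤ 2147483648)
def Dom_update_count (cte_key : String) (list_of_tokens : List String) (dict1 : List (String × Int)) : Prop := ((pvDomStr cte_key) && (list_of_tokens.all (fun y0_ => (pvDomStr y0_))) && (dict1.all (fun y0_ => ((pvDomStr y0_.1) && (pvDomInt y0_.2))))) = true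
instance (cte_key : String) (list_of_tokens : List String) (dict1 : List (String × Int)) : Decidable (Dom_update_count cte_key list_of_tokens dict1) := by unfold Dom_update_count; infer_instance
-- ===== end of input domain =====

-- B replaces A's two index comprehensions + index loop by one pairwise zip pass that counts
-- matches and a single dict update ('simpler'); the dict mutation A performs in place is the
-- same final dict state, and equivalence is about the returned dict.

-- ===== PORT A =====
-- loop body of A's 'for idx_1 in indices_1'; the 'none' branch is Python's KeyError (excluded by Pre_)
def pvStepA (cte_key : String) (list_of_tokens : List String) (d : PySem.Dict String Int) (idx : Int) : PySem.Dict String Int :=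
  if 0 < idx ∧ idx < (list_of_tokens.length : Int) then
    -- list_of_tokens[idx_1 - 1]: in range under the guard, so pyGetD with a dummy default is exact
    if PySem.List.pyGetD list_of_tokens (idx - 1) "" ∈ ["FROM", "JOIN", "from", "join"] then
      match d.get? cte_key with
      | some v => d.insert cte_key (v + 1)
      | none => d
    else d
  else d

def update_count (cte_key : String) (list_of_tokens : List String) (dict1 : List (String × Int)) : List (String × Int) :=
  let case_1 := cte_key ++ ")"
  let case_2 := cte_key
  let indices := (PySem.List.enumerate list_of_tokens).filterMap (fun p => if p.2 = case_1 then some p.1 else none)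
  let indices_1 := (PySem.List.enumerate list_of_tokens).filterMap (fun p => if p.2 = case_2 then some p.1 else none)
  let indices_1 := indices_1 ++ indices
  (indices_1.foldl (pvStepA cte_key list_of_tokens) (PySem.Dict.ofList dict1)).items

-- ===== PORT B =====
def update_count_alt (cte_key : String) (list_of_tokens : List String) (dict1 : List (String × Int)) : List (String × Int) :=
  let d := PySem.Dict.ofList dict1
  let n := (list_of_tokens.zip (PySem.List.slice list_of_tokens (some 1) none)).countP
    (fun p => decide ((p.2 = cte_key ∨ p.2 = cte_key ++ ")") ∧ p.1 ∈ ["FROM", "JOIN", "from", "join"]))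
  if n = 0 then d.items
  else
    match d.get? cte_key with
    | some v => (d.insert cte_key (v + (n : Int))).items
    | none => d.items   -- Python: KeyError (excluded by Pre_)

-- ===== PRECONDITION & SPEC =====
-- Pre_ excludes exactly the inputs where cte_key is missing from dict1 while some token matches
-- after a FROM/JOIN token: there Python A (and Python B) raises KeyError.
def Pre_update_count (cte_key : String) (list_of_tokens : List String) (dict1 : List (String × Int)) : Prop :=
  cte_key ∈ dict1.map Prod.fst ∨
    ∀ p ∈ list_of_tokens.zip list_of_tokens.tail,
      ¬((p.2 = cte_key ∨ p.2 = cte_key ++ ")") ∧ p.1 ∈ ["FROM", "JOIN", "from", "join"])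
instance (cte_key : String) (list_of_tokens : List String) (dict1 : List (String × Int)) : Decidable (Pre_update_count cte_key list_of_tokens dict1) := by unfold Pre_update_count; infer_instance

def pvWitness_update_count : String × List String × (List (String × Int)) := ("t", ["FROM", "t", "JOIN", "t)"], [("t", 1)])

def Spec_update_count (cte_key : String) (list_of_tokens : List String) (dict1 : List (String × Int)) (out : List (String × Int)) : Prop := out = update_count_alt cte_key list_of_tokens dict1
instance (cte_key : String) (list_of_tokens : List String) (dict1 : List (String × Int)) (out : List (String × Int)) : Decidable (Spec_update_count cte_key list_of_tokens dict1 out) := by unfold Spec_update_count; infer_instance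

-- ===== CLAIM (what is proved, stated in full; the proofs are below) =====
def Claim_equal_update_count : Prop := ∀ (cte_key : String) (list_of_tokens : List String) (dict1 : List (String × Int)), Dom_update_count cte_key list_of_tokens dict1 → Pre_update_count cte_key list_of_tokens dict1 → Spec_update_count cte_key list_of_tokens dict1 (update_count cte_key list_of_tokens dict1)

-- ===== LEMMAS AND PROOFS =====

-- repeated "+1" bumps collapse to one "+n" bump
def pvBump (key : String) (d : PySem.Dict String Int) : PySem.Dict String Int :=
  match d.get? key with
  | some v => d.insert key (v + 1)
  | none => d

def pvBumpN (key : String) (d : PySem.Dict String Int) (n : Nat) : PySem.Dict String Int :=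
  if n = 0 then d
  else
    match d.get? key with
    | some v => d.insert key (v + (n : Int))
    | none => d

def pvQ (toks : List String) (i : Int) : Bool :=
  decide (0 < i ∧ i < (toks.length : Int) ∧ PySem.List.pyGetD toks (i - 1) "" ∈ ["FROM", "JOIN", "from", "join"])

theorem pvStepA_eq (key : String) (toks : List String) (d : PySem.Dict String Int) (i : Int) :
    pvStepA key toks d i = if pvQ toks i then pvBump key d else d := by
  cases hq : pvQ toks i
  · rw [if_neg (by simp)]
    have h : ¬(0 < i ∧ i < (toks.length : Int) ∧ PySem.List.pyGetD toks (i - 1) "" ∈ ["FROM", "JOIN", "from", "join"]) := by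
      simpa [pvQ] using hq
    unfold pvStepA
    split_ifs with h1 h2
    · exact absurd ⟨h1.1, h1.2, h2⟩ h
    · rfl
    · rfl
  · rw [if_pos (by simp)]
    have h : 0 < i ∧ i < (toks.length : Int) ∧ PySem.List.pyGetD toks (i - 1) "" ∈ ["FROM", "JOIN", "from", "join"] := by
      simpa [pvQ] using hq
    unfold pvStepA pvBump
    rw [if_pos ⟨h.1, h.2.1⟩, if_pos h.2.2]

theorem pvBumpN_bump (key : String) (d : PySem.Dict String Int) (m : Nat) :
    pvBumpN key (pvBump key d) m = pvBumpN key d (m + 1) := by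
  unfold pvBumpN pvBump
  cases hg : d.get? key with
  | none => simp [hg]
  | some v =>
    by_cases hm : m = 0
    · subst hm; simp
    · simp only [hm, if_false, PySem.Dict.get?_insert_self, PySem.Dict.insert_insert_self]
      norm_num
      ring_nf

theorem pvFoldl_bump (key : String) (toks : List String) (l : List Int) (d : PySem.Dict String Int) :
    l.foldl (pvStepA key toks) d = pvBumpN key d (l.countP (pvQ toks)) := by
  induction l generalizing d with
  | nil => simp [pvBumpN]
  | cons x l ih =>
    rw [List.foldl_cons, ih, List.countP_cons, pvStepA_eq]
    by_cases h : pvQ toks x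
    · simp [h, pvBumpN_bump]
    · simp [h]

theorem pvFilterMap_if (c : String) (l : List (Int × String)) :
    l.filterMap (fun p => if p.2 = c then some p.1 else none)
      = (l.filter (fun p => p.2 == c)).map Prod.fst := by
  induction l with
  | nil => rfl
  | cons x l ih =>
    by_cases h : x.2 = c <;> simp [h, ih]

theorem pvCountP_or_disjoint {α : Type} (p q : α → Bool) (l : List α)
    (h : ∀ x, ¬(p x = true ∧ q x = true)) :
    l.countP (fun x => p x || q x) = l.countP p + l.countP q := by
  induction l with
  | nil => rfl
  | cons x l ih =>
    cases hp : p x <;> cases hq : q x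
    · simp [ih, hp, hq]
    · (simp [ih, hp, hq]); omega
    · (simp [ih, hp, hq]); omega
    · exact absurd ⟨hp, hq⟩ (h x)

-- A-side count over the enumerate-derived index list, as a count over List.range
theorem pvCntA_range (toks : List String) (c : String) :
    ((PySem.List.enumerate toks).filterMap (fun p => if p.2 = c then some p.1 else none)).countP (pvQ toks)
      = (List.range toks.length).countP
          (fun k => (toks.getD k "" == c) && (decide (0 < k) && decide (toks.getD (k - 1) "" ∈ ["FROM", "JOIN", "from", "join"]))) := by
  rw [pvFilterMap_if, List.countP_map, List.countP_filter]
  rw [PySem.List.enumerate_eq_map_pyRange toks ""]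
  rw [PySem.List.pyRange_one]
  simp only [List.map_map, List.countP_map, Int.sub_zero]
  apply List.countP_congr
  intro k hk
  have hk' : k < toks.length := List.mem_range.mp hk
  simp only [Function.comp, zero_add, PySem.List.pyGetD_natCast]
  by_cases h0 : k = 0
  · subst h0; simp [pvQ]
  · have h1 : ((k : Int)) - 1 = ((k - 1 : Nat) : Int) := by omega
    have hp2 : ((k : Int)) < (toks.length : Int) := by omega
    simp only [pvQ, h1, Bool.and_eq_true, decide_eq_true_eq, beq_iff_eq, PySem.List.pyGetD_natCast]
    constructor
    · rintro ⟨⟨_, _, hm⟩, hc⟩; exact ⟨hc, by omega, hm⟩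
    · rintro ⟨hc, hk0, hm⟩; exact ⟨⟨by omega, hp2, hm⟩, hc⟩

-- shift: a count over range n of a predicate false at 0 is a count over range (n-1), shifted
theorem pvCountP_range_shift (n : Nat) (F : Nat → Bool) (h0 : F 0 = false) :
    (List.range n).countP F = (List.range (n - 1)).countP (fun j => F (j + 1)) := by
  cases n with
  | zero => rfl
  | succ m =>
    rw [List.range_succ_eq_map, List.countP_cons, h0, List.countP_map]
    simp only [Nat.succ_sub_one]
    apply List.countP_congr
    intro j _
    simp [Nat.succ_eq_add_one]

-- B-side count over zip of consecutive pairs, as a count over List.range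
theorem pvCnt_zip (toks : List String) (p : String × String → Bool) :
    (toks.zip toks.tail).countP p
      = (List.range (toks.length - 1)).countP (fun j => p (toks.getD j "", toks.getD (j + 1) "")) := by
  induction toks with
  | nil => rfl
  | cons a t ih =>
    cases t with
    | nil => rfl
    | cons b t' =>
      have hz : (a :: b :: t').zip (a :: b :: t').tail = (a, b) :: ((b :: t').zip (b :: t').tail) := by
        simp [List.zip]
      rw [hz, List.countP_cons, ih]
      have hlen : (a :: b :: t').length - 1 = t'.length + 1 := by simp
      rw [hlen, List.range_succ_eq_map, List.countP_cons, List.countP_map]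
      simp only [List.getD_cons_zero, List.getD_cons_succ]
      have hl2 : (b :: t').length - 1 = t'.length := by simp
      rw [hl2]
      have hfun : (fun j => p ((b :: t').getD j "", t'.getD j ""))
          = ((fun j => p ((a :: b :: t').getD j "", (b :: t').getD j "")) ∘ Nat.succ) := by
        funext j
        simp
      rw [hfun]

theorem pvKey_ne (key : String) : ¬ (key ++ ")" = key) := by
  intro h
  have := congrArg String.length h
  simp [String.length_append] at this

-- ===== VERDICT (by name: the statement is the Claim_ definition above) =====
theorem update_count_spec : Claim_equal_update_count := by
  intro cte_key toks dict1 _ _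
  dsimp only [Spec_update_count, update_count, update_count_alt]
  rw [PySem.List.slice_from_one]
  rw [pvFoldl_bump, List.countP_append, pvCntA_range, pvCntA_range]
  have hcount :
      (List.range toks.length).countP
          (fun k => (toks.getD k "" == cte_key) && (decide (0 < k) && decide (toks.getD (k - 1) "" ∈ ["FROM", "JOIN", "from", "join"])))
        + (List.range toks.length).countP
          (fun k => (toks.getD k "" == cte_key ++ ")") && (decide (0 < k) && decide (toks.getD (k - 1) "" ∈ ["FROM", "JOIN", "from", "join"])))
      = (toks.zip toks.tail).countP
          (fun p => decide ((p.2 = cte_key ∨ p.2 = cte_key ++ ")") ∧ p.1 ∈ ["FROM", "JOIN", "from", "join"])) := by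
    rw [← pvCountP_or_disjoint _ _ _ (by
      intro k hk
      obtain ⟨h2, h1⟩ := hk
      simp only [Bool.and_eq_true, beq_iff_eq] at h1 h2
      exact pvKey_ne cte_key (h1.1 ▸ h2.1))]
    rw [pvCountP_range_shift _ _ (by simp)]
    rw [pvCnt_zip]
    apply List.countP_congr
    intro j _
    have hj : j + 1 - 1 = j := by omega
    simp only [hj, Bool.and_eq_true, Bool.or_eq_true, decide_eq_true_eq, beq_iff_eq,
      List.mem_cons, List.not_mem_nil, or_false, Nat.zero_lt_succ, true_and]
    tauto
  rw [hcount]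
  unfold pvBumpN
  by_cases hn :
      (toks.zip toks.tail).countP
          (fun p => decide ((p.2 = cte_key ∨ p.2 = cte_key ++ ")") ∧ p.1 ∈ ["FROM", "JOIN", "from", "join"])) = 0
  · rw [if_pos hn, if_pos hn]
  · rw [if_neg hn, if_neg hn]
    cases (PySem.Dict.ofList dict1).get? cte_key <;> simp
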